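-- pv_equiv track=rewrite | github.com/mohi-othman/mohi-euler-python | Euler043.py | addDigit
-- ===== SOURCE A (Python) =====
-- def addDigit(digitsSoFar, digitsLeft, resultList):
--     for d in digitsLeft:
--         if d!=0 or len(digitsSoFar)>0:
--             myDigitsSoFar = list(digitsSoFar)
--             myDigitsLeft = list(digitsLeft)
--             myDigitsSoFar.append(str(d))
--             myDigitsLeft.remove(d)
--             if len(myDigitsLeft) == 0:
--                 resultList.append(''.join(myDigitsSoFar))
--             else:
--                 addDigit(myDigitsSoFar, myDigitsLeft, resultList)
--
--     return resultList
-- ===== SOURCE B (Python) =====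
-- def _suffixes(left):
--     # pure generator of all permutation-strings of `left`, in the same
--     # first-occurrence-removal order as iterating the list itself
--     if not left:
--         yield ''
--         return
--     for d in left:
--         rest = list(left)
--         rest.remove(d)
--         for tail in _suffixes(rest):
--             yield str(d) + tail
--
-- def addDigit(digitsSoFar, digitsLeft, resultList):
--     prefix = ''.join(digitsSoFar)
--     for d in digitsLeft:
--         if d == 0 and not digitsSoFar:
--             continue
--         rest = list(digitsLeft)
--         rest.remove(d)
--         resultList.extend(prefix + str(d) + tail for tail in _suffixes(rest))
--     return resultList
-- ===== Notes on version B (the rewrite author's own statement) =====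
-- stated objective: alternative
-- what changed: A's recursive backtracking threads mutable digitsSoFar/digitsLeft copies and the shared result list through every recursion level; B computes the prefix join once and replaces the recursion by a pure generator of permutation suffix strings, with a single top-level loop doing the leading-zero skip and a single extend of resultList.
import Mathlib
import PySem

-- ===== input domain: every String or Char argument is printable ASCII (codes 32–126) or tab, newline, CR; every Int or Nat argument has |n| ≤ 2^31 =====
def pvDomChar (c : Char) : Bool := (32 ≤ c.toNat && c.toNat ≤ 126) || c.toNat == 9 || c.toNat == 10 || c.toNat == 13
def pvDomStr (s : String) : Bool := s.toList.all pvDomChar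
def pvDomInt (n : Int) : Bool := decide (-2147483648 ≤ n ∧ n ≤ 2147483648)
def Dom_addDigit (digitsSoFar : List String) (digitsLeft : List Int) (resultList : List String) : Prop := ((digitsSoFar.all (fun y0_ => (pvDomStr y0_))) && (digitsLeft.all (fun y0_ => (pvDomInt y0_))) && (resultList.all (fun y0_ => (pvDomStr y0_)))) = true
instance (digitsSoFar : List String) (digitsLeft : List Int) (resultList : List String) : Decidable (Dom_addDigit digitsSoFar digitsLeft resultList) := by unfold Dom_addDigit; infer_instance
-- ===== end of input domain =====

-- B replaces A's backtracking over copied accumulator lists by a pure recursive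
-- generator of permutation suffix strings plus one top-level loop (objective:
-- alternative/simpler). Both A and B append to resultList in place; the theorems
-- are about the returned value (which is that same list).

-- `xs.remove(v)` for a v known to be in xs (both programs only call it that way)
def pvRemoveFirst (xs : List Int) (v : Int) : List Int :=
  (PySem.List.remove? xs v).getD xs

-- termination helper, cited by both ports' decreasing_by
theorem pvRemoveFirst_length_lt (xs : List Int) (v : Int) (h : v ∈ xs) :
    (pvRemoveFirst xs v).length < xs.length := by
  unfold pvRemoveFirst
  rw [show PySem.List.remove? xs v = some (xs.erase v) from PySem.List.remove?_eq_some_erase xs v h]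
  have := List.length_erase_of_mem h
  have hpos : 0 < xs.length := List.length_pos_of_mem h
  simp [this]
  omega

-- ===== PORT A =====
def addDigit (digitsSoFar : List String) (digitsLeft : List Int) (resultList : List String) : List String :=
  digitsLeft.attach.foldl
    (fun res x =>
      let d := x.val
      if d ≠ 0 ∨ digitsSoFar.length > 0 then
        let myDigitsSoFar := digitsSoFar ++ [PySem.Int.toStr d]
        let myDigitsLeft := pvRemoveFirst digitsLeft d
        if myDigitsLeft.length = 0 then res ++ [PySem.Str.join "" myDigitsSoFar]
        else addDigit myDigitsSoFar myDigitsLeft res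
      else res)
    resultList
termination_by digitsLeft.length
decreasing_by exact pvRemoveFirst_length_lt _ _ x.property

-- ===== PORT B =====
-- Source B's generator _suffixes, as the list of the strings it yields (in order)
def pvSuffixes (left : List Int) : List String :=
  if _h : left = [] then [""]
  else left.attach.flatMap
    (fun x => (pvSuffixes (pvRemoveFirst left x.val)).map
      (fun tail => PySem.Int.toStr x.val ++ tail))
termination_by left.length
decreasing_by exact pvRemoveFirst_length_lt _ _ x.property

def addDigit_alt (digitsSoFar : List String) (digitsLeft : List Int) (resultList : List String) : List String :=
  let pfx := PySem.Str.join "" digitsSoFar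
  digitsLeft.foldl
    (fun res d =>
      if d = 0 ∧ digitsSoFar = [] then res
      else res ++ (pvSuffixes (pvRemoveFirst digitsLeft d)).map
        (fun tail => (pfx ++ PySem.Int.toStr d) ++ tail))
    resultList

-- ===== PRECONDITION & SPEC =====
def Spec_addDigit (digitsSoFar : List String) (digitsLeft : List Int) (resultList : List String) (out : List String) : Prop := out = addDigit_alt digitsSoFar digitsLeft resultList
instance (digitsSoFar : List String) (digitsLeft : List Int) (resultList : List String) (out : List String) : Decidable (Spec_addDigit digitsSoFar digitsLeft resultList out) := by unfold Spec_addDigit; infer_instance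

-- ===== CLAIM (what is proved, stated in full; the proofs are below) =====
def Claim_equal_addDigit : Prop := ∀ (digitsSoFar : List String) (digitsLeft : List Int) (resultList : List String), Dom_addDigit digitsSoFar digitsLeft resultList → Spec_addDigit digitsSoFar digitsLeft resultList (addDigit digitsSoFar digitsLeft resultList)

-- ===== LEMMAS AND PROOFS =====

theorem intercalate_nil_sep (xss : List (List Char)) : List.intercalate [] xss = xss.flatten := by
  induction xss with
  | nil => simp [List.intercalate]
  | cons a t ih =>
    cases t with
    | nil => simp [List.intercalate]
    | cons b u =>
      simp [List.intercalate, List.intersperse] at ih ⊢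
      simpa using ih

theorem join_empty_append (l : List String) (s : String) :
    PySem.Str.join "" (l ++ [s]) = PySem.Str.join "" l ++ s := by
  simp [PySem.Str.join, PySem.Chars.join, intercalate_nil_sep]

-- what both programs append to resultList, per top-level choice d
def pvG (dsf : List String) (dl : List Int) : List String :=
  dl.flatMap (fun d =>
    if d = 0 ∧ dsf = [] then []
    else (pvSuffixes (pvRemoveFirst dl d)).map
      (fun t => (PySem.Str.join "" dsf ++ PySem.Int.toStr d) ++ t))

theorem foldl_skip_or_append {α β : Type} (c : α → Prop) [DecidablePred c]
    (g : α → List β) (l : List α) (res : List β) :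
    l.foldl (fun r d => if c d then r else r ++ g d) res
      = res ++ l.flatMap (fun d => if c d then [] else g d) := by
  induction l generalizing res with
  | nil => simp
  | cons a t ih =>
    simp only [List.foldl_cons, List.flatMap_cons, ih]
    split_ifs <;> simp

theorem foldl_attach_append {α β : Type} (l : List α)
    (step : List β → {x // x ∈ l} → List β) (g : α → List β)
    (hstep : ∀ r (x : {x // x ∈ l}), step r x = r ++ g x.val) (res : List β) :
    l.attach.foldl step res = res ++ l.flatMap g := by
  have aux : ∀ (ys : List {x // x ∈ l}) (r : List β),
      ys.foldl step r = r ++ ys.flatMap (fun y => g y.val) := by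
    intro ys
    induction ys with
    | nil => intro r; simp
    | cons a t ih => intro r; simp [hstep, ih]
  rw [aux]
  congr 1
  calc l.attach.flatMap (fun y => g y.val)
      = (l.attach.map Subtype.val).flatMap g := by rw [List.flatMap_map]
    _ = l.flatMap g := by rw [List.attach_map_subtype_val]

theorem pvSuffixes_of_ne (l : List Int) (h : l ≠ []) :
    pvSuffixes l = l.flatMap
      (fun d => (pvSuffixes (pvRemoveFirst l d)).map (fun t => PySem.Int.toStr d ++ t)) := by
  rw [pvSuffixes]
  rw [dif_neg h]
  calc l.attach.flatMap (fun x => (pvSuffixes (pvRemoveFirst l x.val)).map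
          (fun t => PySem.Int.toStr x.val ++ t))
      = (l.attach.map Subtype.val).flatMap
          (fun d => (pvSuffixes (pvRemoveFirst l d)).map (fun t => PySem.Int.toStr d ++ t)) := by
        rw [List.flatMap_map]
    _ = _ := by rw [List.attach_map_subtype_val]

theorem pvG_of_ne (dsf : List String) (l : List Int) (hdsf : dsf ≠ []) (hl : l ≠ []) :
    pvG dsf l = (pvSuffixes l).map (fun t => PySem.Str.join "" dsf ++ t) := by
  rw [pvG, pvSuffixes_of_ne l hl, List.map_flatMap]
  apply List.flatMap_congr
  intro d _
  rw [if_neg (by simp [hdsf])]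
  rw [List.map_map]
  apply List.map_congr_left
  intro t _
  simp [String.append_assoc]

theorem addDigit_eq_append_aux : ∀ (n : Nat) (dl : List Int), dl.length = n →
    ∀ (dsf res : List String), addDigit dsf dl res = res ++ pvG dsf dl := by
  intro n
  induction n using Nat.strong_induction_on with
  | _ n ih =>
    intro dl hlen dsf res
    rw [addDigit, pvG]
    apply foldl_attach_append (g := fun d =>
      if d = 0 ∧ dsf = [] then []
      else (pvSuffixes (pvRemoveFirst dl d)).map
        (fun t => (PySem.Str.join "" dsf ++ PySem.Int.toStr d) ++ t))
    intro r x
    obtain ⟨d, hd⟩ := x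
    by_cases hc : d = 0 ∧ dsf = []
    · have hg : ¬ (d ≠ 0 ∨ dsf.length > 0) := by
        simp [hc.1, hc.2]
      simp only [hg, if_pos hc]
      simp
    · have hg : d ≠ 0 ∨ dsf.length > 0 := by
        rcases Decidable.not_and_iff_not_or_not.mp hc with h | h
        · exact Or.inl h
        · right; cases dsf with
          | nil => exact absurd rfl h
          | cons a t => simp
      simp only [hg, if_neg hc]
      have hlt : (pvRemoveFirst dl d).length < dl.length := pvRemoveFirst_length_lt dl d hd
      by_cases hr : (pvRemoveFirst dl d).length = 0
      · have hnil : pvRemoveFirst dl d = [] := List.length_eq_zero_iff.mp hr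
        rw [if_pos hr, hnil]
        rw [pvSuffixes]
        simp [join_empty_append]
      · rw [if_neg hr]
        have hih := ih (pvRemoveFirst dl d).length (by omega) (pvRemoveFirst dl d) rfl
          (dsf ++ [PySem.Int.toStr d]) r
        rw [hih]
        rw [pvG_of_ne _ _ (by simp) (by intro h0; exact hr (by simp [h0]))]
        rw [join_empty_append]
        simp

theorem addDigit_eq_append (dl : List Int) (dsf res : List String) :
    addDigit dsf dl res = res ++ pvG dsf dl :=
  addDigit_eq_append_aux dl.length dl rfl dsf res

theorem addDigit_alt_eq_append (dsf : List String) (dl : List Int) (res : List String) :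
    addDigit_alt dsf dl res = res ++ pvG dsf dl := by
  unfold addDigit_alt pvG
  exact foldl_skip_or_append (fun d => d = 0 ∧ dsf = []) _ dl res

-- ===== VERDICT (by name: the statement is the Claim_ definition above) =====
theorem addDigit_spec : Claim_equal_addDigit := by
  intro dsf dl res _
  unfold Spec_addDigit
  rw [addDigit_eq_append, addDigit_alt_eq_append]
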